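-- pv_equiv track=rewrite | github.com/netdragon-beep/fly | qyPython/env/agent/qvga/reward.py | get_unit_counts
-- ===== SOURCE A (Python) =====
-- from typing import Dict, List, Optional, Set, Tuple
--
-- def get_unit_counts(obs: Dict, side: str) -> Dict[str, int]:
--     """
--     统计单位数量
--
--     Returns:
--         {'own_manned': n, 'own_uav': n, 'enemy_manned': n, 'enemy_uav': n}
--     """
--     enemy_side = "blue" if side == "red" else "red"
--
--     own_manned = sum(1 for p in obs.get('platform_list', []) if p.get('type') == '有人机')
--     own_uav = sum(1 for p in obs.get('platform_list', []) if p.get('type') == '无人机')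
--
--     enemy_manned = sum(1 for t in obs.get('track_list', [])
--                        if t.get('platform_entity_side') == enemy_side
--                        and t.get('platform_entity_type') == '有人机')
--     enemy_uav = sum(1 for t in obs.get('track_list', [])
--                     if t.get('platform_entity_side') == enemy_side
--                     and t.get('platform_entity_type') == '无人机')
--
--     return {
--         'own_manned': own_manned,
--         'own_uav': own_uav,
--         'enemy_manned': enemy_manned,
--         'enemy_uav': enemy_uav
--     }
-- ===== SOURCE B (Python) =====
-- def get_unit_counts(obs, side):
--     enemy_side = "blue" if side == "red" else "red"
--     counts = {'own_manned': 0, 'own_uav': 0, 'enemy_manned': 0, 'enemy_uav': 0}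
--     kind = {'\u6709\u4eba\u673a': 'manned', '\u65e0\u4eba\u673a': 'uav'}
--     for p in obs.get('platform_list', []):
--         k = kind.get(p.get('type'))
--         if k is not None:
--             counts['own_' + k] += 1
--     for t in obs.get('track_list', []):
--         if t.get('platform_entity_side') == enemy_side:
--             k = kind.get(t.get('platform_entity_type'))
--             if k is not None:
--                 counts['enemy_' + k] += 1
--     return counts
-- ===== Notes on version B (the rewrite author's own statement) =====
-- stated objective: alternative
-- what changed: Replaces A's four independent counter sums with a single result dict used as the accumulator: each record is mapped through a type->kind classification table to an output key and the dict entry for that key is incremented in place, one loop per list.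
import Mathlib
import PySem

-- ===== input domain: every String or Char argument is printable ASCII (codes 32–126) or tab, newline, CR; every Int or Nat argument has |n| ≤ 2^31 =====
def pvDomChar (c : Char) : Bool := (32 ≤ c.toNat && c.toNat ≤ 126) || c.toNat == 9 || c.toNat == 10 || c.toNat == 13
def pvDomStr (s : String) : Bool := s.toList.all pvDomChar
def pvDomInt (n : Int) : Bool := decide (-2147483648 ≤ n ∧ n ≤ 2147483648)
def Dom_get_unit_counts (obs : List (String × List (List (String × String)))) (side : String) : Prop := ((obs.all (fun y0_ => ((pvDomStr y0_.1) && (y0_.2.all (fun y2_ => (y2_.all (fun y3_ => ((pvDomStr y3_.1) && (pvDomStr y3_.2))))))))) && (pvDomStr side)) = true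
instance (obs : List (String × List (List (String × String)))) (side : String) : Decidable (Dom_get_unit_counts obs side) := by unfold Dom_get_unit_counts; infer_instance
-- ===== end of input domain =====

-- B replaces A's four counter sums by ONE result dict used as the accumulator, bumped through a
-- type→kind classification table (objective: alternative); same return value on every input.

-- ===== PORT A =====
def get_unit_counts (obs : List (String × List (List (String × String)))) (side : String) : List (String × Int) :=
  let enemy_side : String := if side == "red" then "blue" else "red"
  let pl := PySem.Dict.getD (PySem.Dict.mk obs) "platform_list" []
  let tl := PySem.Dict.getD (PySem.Dict.mk obs) "track_list" []
  let own_manned : Int := pl.foldl (fun acc p => if PySem.Dict.get? (PySem.Dict.mk p) "type" == some "有人机" then acc + 1 else acc) 0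
  let own_uav : Int := pl.foldl (fun acc p => if PySem.Dict.get? (PySem.Dict.mk p) "type" == some "无人机" then acc + 1 else acc) 0
  let enemy_manned : Int := tl.foldl (fun acc t =>
    if PySem.Dict.get? (PySem.Dict.mk t) "platform_entity_side" == some enemy_side
       && (PySem.Dict.get? (PySem.Dict.mk t) "platform_entity_type" == some "有人机") then acc + 1 else acc) 0
  let enemy_uav : Int := tl.foldl (fun acc t =>
    if PySem.Dict.get? (PySem.Dict.mk t) "platform_entity_side" == some enemy_side
       && (PySem.Dict.get? (PySem.Dict.mk t) "platform_entity_type" == some "无人机") then acc + 1 else acc) 0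
  [("own_manned", own_manned), ("own_uav", own_uav), ("enemy_manned", enemy_manned), ("enemy_uav", enemy_uav)]

-- ===== PORT B =====
-- the classification table  kind = {'有人机': 'manned', '无人机': 'uav'}
def pvKind : PySem.Dict String String := PySem.Dict.mk [("有人机", "manned"), ("无人机", "uav")]

-- kind.get(x.get(field)) : Python's dict.get applied to a possibly-None key is Option.bind here
def pvClassify (x : List (String × String)) (field : String) : Option String :=
  (PySem.Dict.get? (PySem.Dict.mk x) field).bind (fun ty => PySem.Dict.get? pvKind ty)

def get_unit_counts_alt (obs : List (String × List (List (String × String)))) (side : String) : List (String × Int) :=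
  let enemy_side : String := if side == "red" then "blue" else "red"
  let counts0 : PySem.Dict String Int :=
    PySem.Dict.mk [("own_manned", 0), ("own_uav", 0), ("enemy_manned", 0), ("enemy_uav", 0)]
  -- counts['own_' + k] += 1: the key is always one of the four present keys, so Dict.modify (default 0) is exact
  let counts1 := (PySem.Dict.getD (PySem.Dict.mk obs) "platform_list" []).foldl (fun counts p =>
    match pvClassify p "type" with
    | some k => counts.modify ("own_" ++ k) 0 (· + 1)
    | none => counts) counts0
  let counts2 := (PySem.Dict.getD (PySem.Dict.mk obs) "track_list" []).foldl (fun counts t =>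
    if PySem.Dict.get? (PySem.Dict.mk t) "platform_entity_side" == some enemy_side then
      match pvClassify t "platform_entity_type" with
      | some k => counts.modify ("enemy_" ++ k) 0 (· + 1)
      | none => counts
    else counts) counts1
  counts2.items

-- ===== PRECONDITION & SPEC =====
def Spec_get_unit_counts (obs : List (String × List (List (String × String)))) (side : String) (out : List (String × Int)) : Prop := out = get_unit_counts_alt obs side
instance (obs : List (String × List (List (String × String)))) (side : String) (out : List (String × Int)) : Decidable (Spec_get_unit_counts obs side out) := by unfold Spec_get_unit_counts; infer_instance

-- ===== CLAIM (what is proved, stated in full; the proofs are below) =====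
def Claim_equal_get_unit_counts : Prop := ∀ (obs : List (String × List (List (String × String)))) (side : String), Dom_get_unit_counts obs side → Spec_get_unit_counts obs side (get_unit_counts obs side)

-- ===== LEMMAS AND PROOFS =====

-- the four-counter dict, abbreviated for the loop invariants
def Dfour (a b c d : Int) : PySem.Dict String Int :=
  PySem.Dict.mk [("own_manned", a), ("own_uav", b), ("enemy_manned", c), ("enemy_uav", d)]

-- what the classification table answers on an arbitrary looked-up value
theorem classify_eq (x : List (String × String)) (field : String) :
    pvClassify x field
    = (if PySem.Dict.get? (PySem.Dict.mk x) field == some "有人机" then some "manned"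
       else if PySem.Dict.get? (PySem.Dict.mk x) field == some "无人机" then some "uav"
       else none) := by
  unfold pvClassify pvKind
  cases o : PySem.Dict.get? (PySem.Dict.mk x) field with
  | none => rfl
  | some s =>
    by_cases h1 : s = "有人机"
    · subst h1; rfl
    · by_cases h2 : s = "无人机"
      · subst h2; rfl
      · have e1 : (("有人机" : String) == s) = false := beq_eq_false_iff_ne.mpr (Ne.symm h1)
        have e2 : (("无人机" : String) == s) = false := beq_eq_false_iff_ne.mpr (Ne.symm h2)
        have g1 : ((some s : Option String) == some "有人机") = false := by simp [h1]
        have g2 : ((some s : Option String) == some "无人机") = false := by simp [h2]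
        simp only [Option.bind_some, PySem.Dict.get?, List.find?, e1, e2, g1, g2,
          Bool.false_eq_true, if_false, Option.map_none]

-- the two Chinese type tags are distinct strings
theorem not_both (o : Option String) (h : (o == some "有人机") = true) :
    (o == some "无人机") = false := by
  cases o with
  | none => simp at h
  | some s =>
    have : s = "有人机" := by simpa using h
    subst this; decide

-- one platform step of B's counter-dict loop, in terms of A's two own counters
theorem step1_eq (x : List (String × String)) (a b c d : Int) :
    (match pvClassify x "type" with
     | some k => (Dfour a b c d).modify ("own_" ++ k) 0 (· + 1)
     | none => Dfour a b c d)
    = Dfour (if PySem.Dict.get? (PySem.Dict.mk x) "type" == some "有人机" then a + 1 else a)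
            (if PySem.Dict.get? (PySem.Dict.mk x) "type" == some "无人机" then b + 1 else b)
            c d := by
  rw [classify_eq]
  by_cases h1 : (PySem.Dict.get? (PySem.Dict.mk x) "type" == some "有人机") = true
  · rw [h1, not_both _ h1]; rfl
  · rw [Bool.eq_false_iff.mpr h1]
    by_cases h2 : (PySem.Dict.get? (PySem.Dict.mk x) "type" == some "无人机") = true
    · rw [h2]; rfl
    · rw [Bool.eq_false_iff.mpr h2]; rfl

-- one track step of B's counter-dict loop, in terms of A's two enemy counters
theorem step2_eq (es : String) (x : List (String × String)) (a b c d : Int) :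
    (if PySem.Dict.get? (PySem.Dict.mk x) "platform_entity_side" == some es then
       match pvClassify x "platform_entity_type" with
       | some k => (Dfour a b c d).modify ("enemy_" ++ k) 0 (· + 1)
       | none => Dfour a b c d
     else Dfour a b c d)
    = Dfour a b
        (if PySem.Dict.get? (PySem.Dict.mk x) "platform_entity_side" == some es
            && (PySem.Dict.get? (PySem.Dict.mk x) "platform_entity_type" == some "有人机") then c + 1 else c)
        (if PySem.Dict.get? (PySem.Dict.mk x) "platform_entity_side" == some es
            && (PySem.Dict.get? (PySem.Dict.mk x) "platform_entity_type" == some "无人机") then d + 1 else d) := by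
  by_cases hs : (PySem.Dict.get? (PySem.Dict.mk x) "platform_entity_side" == some es) = true
  · rw [hs, classify_eq]
    simp only [Bool.true_and, if_true]
    by_cases h1 : (PySem.Dict.get? (PySem.Dict.mk x) "platform_entity_type" == some "有人机") = true
    · rw [h1, not_both _ h1]; rfl
    · rw [Bool.eq_false_iff.mpr h1]
      by_cases h2 : (PySem.Dict.get? (PySem.Dict.mk x) "platform_entity_type" == some "无人机") = true
      · rw [h2]; rfl
      · rw [Bool.eq_false_iff.mpr h2]; rfl
  · rw [Bool.eq_false_iff.mpr hs]
    simp only [Bool.false_and, Bool.false_eq_true, if_false]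

-- B's platform loop over the counter dict equals A's two own-counter folds
theorem loop1_eq (l : List (List (String × String))) (a b c d : Int) :
    l.foldl (fun counts p =>
      match pvClassify p "type" with
      | some k => counts.modify ("own_" ++ k) 0 (· + 1)
      | none => counts) (Dfour a b c d)
    = Dfour (l.foldl (fun acc p => if PySem.Dict.get? (PySem.Dict.mk p) "type" == some "有人机" then acc + 1 else acc) a)
            (l.foldl (fun acc p => if PySem.Dict.get? (PySem.Dict.mk p) "type" == some "无人机" then acc + 1 else acc) b)
            c d := by
  induction l generalizing a b with
  | nil => rfl
  | cons x xs ih =>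
    simp only [List.foldl_cons]
    rw [step1_eq]
    exact ih _ _

-- B's track loop over the counter dict equals A's two enemy-counter folds
theorem loop2_eq (es : String) (l : List (List (String × String))) (a b c d : Int) :
    l.foldl (fun counts t =>
      if PySem.Dict.get? (PySem.Dict.mk t) "platform_entity_side" == some es then
        match pvClassify t "platform_entity_type" with
        | some k => counts.modify ("enemy_" ++ k) 0 (· + 1)
        | none => counts
      else counts) (Dfour a b c d)
    = Dfour a b
        (l.foldl (fun acc t =>
          if PySem.Dict.get? (PySem.Dict.mk t) "platform_entity_side" == some es
             && (PySem.Dict.get? (PySem.Dict.mk t) "platform_entity_type" == some "有人机") then acc + 1 else acc) c)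
        (l.foldl (fun acc t =>
          if PySem.Dict.get? (PySem.Dict.mk t) "platform_entity_side" == some es
             && (PySem.Dict.get? (PySem.Dict.mk t) "platform_entity_type" == some "无人机") then acc + 1 else acc) d) := by
  induction l generalizing c d with
  | nil => rfl
  | cons x xs ih =>
    simp only [List.foldl_cons]
    rw [step2_eq]
    exact ih _ _

theorem get_unit_counts_eq (obs : List (String × List (List (String × String)))) (side : String) :
    get_unit_counts obs side = get_unit_counts_alt obs side := by
  unfold get_unit_counts get_unit_counts_alt
  simp only []
  rw [show (PySem.Dict.mk [("own_manned", (0:Int)), ("own_uav", 0), ("enemy_manned", 0), ("enemy_uav", 0)]) = Dfour 0 0 0 0 from rfl,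
      loop1_eq, loop2_eq]
  rfl

-- ===== VERDICT (by name: the statement is the Claim_ definition above) =====
theorem get_unit_counts_spec : Claim_equal_get_unit_counts := by
  intro obs side _
  exact get_unit_counts_eq obs side
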